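-- pv_equiv track=rewrite | github.com/thloc1212/DM-LAB3 | src/utils.py | _lca_size
-- ===== SOURCE A (Python) =====
-- def _lca_size(a: int, b: int, root_id: int, parent: dict, sizes: dict) -> int:
--     """Helper: Find the Lowest Common Ancestor (LCA) size of two leaves."""
--     anc = set()
--     x = a
--     anc.add(x)
--     while x in parent:
--         x = parent[x]
--         anc.add(x)
--     y = b
--     while y not in anc and y in parent:
--         y = parent[y]
--     if y not in anc:
--         y = root_id
--     return sizes[y]
-- ===== SOURCE B (Python) =====
-- def _lca_size(a: int, b: int, root_id: int, parent: dict, sizes: dict) -> int: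
--     """Find the LCA subtree size by comparing the two root-to-leaf chains.
--
--     Builds both leaf-to-root chains, then walks them root-to-leaf in lockstep
--     (reversed + zip): the last position where they still agree is the LCA; if
--     they disagree already at the roots (or share no tree), fall back to root_id.
--     """
--     def chain(n):
--         c = [n]
--         while n in parent:
--             n = parent[n]
--             c.append(n)
--         return c
--
--     lca = root_id
--     for u, v in zip(reversed(chain(a)), reversed(chain(b))):
--         if u != v:
--             break
--         lca = u
--     return sizes[lca]
-- ===== Notes on version B (the rewrite author's own statement) =====
-- stated objective: alternative
-- what changed: Replaces A's ancestor-set construction plus membership walk from b by building both leaf-to-root chains and scanning them root-to-leaf in lockstep (reversed+zip), keeping the last agreeing node as the LCA.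
import Mathlib
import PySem

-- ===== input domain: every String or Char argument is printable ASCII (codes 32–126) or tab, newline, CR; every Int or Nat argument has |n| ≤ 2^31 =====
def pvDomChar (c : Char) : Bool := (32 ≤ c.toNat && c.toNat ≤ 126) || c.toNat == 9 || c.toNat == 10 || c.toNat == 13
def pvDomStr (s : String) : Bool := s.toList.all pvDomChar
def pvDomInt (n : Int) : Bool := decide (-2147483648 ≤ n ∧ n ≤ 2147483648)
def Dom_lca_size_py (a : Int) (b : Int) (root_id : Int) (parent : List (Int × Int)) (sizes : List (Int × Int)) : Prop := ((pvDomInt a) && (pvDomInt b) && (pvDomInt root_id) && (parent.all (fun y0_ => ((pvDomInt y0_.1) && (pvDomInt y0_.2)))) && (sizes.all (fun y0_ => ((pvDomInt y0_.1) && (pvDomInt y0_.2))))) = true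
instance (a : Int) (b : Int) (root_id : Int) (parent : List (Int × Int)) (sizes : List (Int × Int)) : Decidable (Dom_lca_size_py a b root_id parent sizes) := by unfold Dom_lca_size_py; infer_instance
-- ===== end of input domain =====

-- B replaces A's ancestor-set walk by a root-to-leaf lockstep comparison of the two full
-- parent chains (alternative decomposition, same cost); equivalence is proved on acyclic
-- parent maps with the size table covering the reachable ids (Pre_).

-- Python dict lookup on an association list: first match (shared dict semantics helper).
def pvPget : List (Int × Int) → Int → Option Int
  | [], _ => none
  | (k, v) :: t, x => if k = x then some v else pvPget t x

-- ===== PORT A =====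
-- `while x in parent: x = parent[x]; anc.add(x)` — fuel = parent.length suffices on Pre_ inputs.
def pvAClimb (parent : List (Int × Int)) : Nat → PySem.Set Int → Int → PySem.Set Int
  | 0, anc, _ => anc
  | f + 1, anc, x =>
    match pvPget parent x with
    | some v => pvAClimb parent f (PySem.Set.add anc v) v
    | none => anc

-- `while y not in anc and y in parent: y = parent[y]`
def pvBWalk (parent : List (Int × Int)) (anc : PySem.Set Int) : Nat → Int → Int
  | 0, y => y
  | f + 1, y =>
    if PySem.Set.contains anc y then y
    else
      match pvPget parent y with
      | some v => pvBWalk parent anc f v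
      | none => y

def lca_size_py (a : Int) (b : Int) (root_id : Int) (parent : List (Int × Int)) (sizes : List (Int × Int)) : Int :=
  let anc := pvAClimb parent parent.length (PySem.Set.add PySem.Set.empty a) a
  let y := pvBWalk parent anc parent.length b
  let y2 := if PySem.Set.contains anc y then y else root_id
  (pvPget sizes y2).getD 0  -- sizes[y2]; a KeyError here is excluded by Pre_

-- ===== PORT B =====
-- `c = [n]; while n in parent: n = parent[n]; c.append(n)`
def pvBChain (parent : List (Int × Int)) : Nat → Int → List Int → List Int
  | 0, _, c => c
  | f + 1, n, c =>
    match pvPget parent n with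
    | some v => pvBChain parent f v (c ++ [v])
    | none => c

-- `for u, v in zip(...): if u != v: break; lca = u`
def pvScan : Int → List (Int × Int) → Int
  | lca, [] => lca
  | lca, (u, v) :: t => if u ≠ v then lca else pvScan u t

def lca_size_py_alt (a : Int) (b : Int) (root_id : Int) (parent : List (Int × Int)) (sizes : List (Int × Int)) : Int :=
  let ca := pvBChain parent parent.length a [a]
  let cb := pvBChain parent parent.length b [b]
  let lca := pvScan root_id (List.zip ca.reverse cb.reverse)
  (pvPget sizes lca).getD 0  -- sizes[lca]; a KeyError here is excluded by Pre_

-- ===== PRECONDITION & SPEC =====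
-- pvEsc parent f x: the parent chain starting at x leaves the key set within f steps.
def pvEsc (parent : List (Int × Int)) : Nat → Int → Bool
  | 0, x => (pvPget parent x).isNone
  | f + 1, x =>
    match pvPget parent x with
    | some v => pvEsc parent f v
    | none => true

-- tail of the full parent chain from x (with fuel), and the chain itself
def pvChT (parent : List (Int × Int)) : Nat → Int → List Int
  | 0, _ => []
  | f + 1, x =>
    match pvPget parent x with
    | some v => v :: pvChT parent f v
    | none => []

def pvCh (parent : List (Int × Int)) (f : Nat) (x : Int) : List Int := x :: pvChT parent f x

-- the node A finally looks up: the first node of b's chain lying on a's chain, else root_id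
def pvLcaNode (a : Int) (b : Int) (root_id : Int) (parent : List (Int × Int)) : Int :=
  (List.find? (fun z => decide (z ∈ pvCh parent parent.length a))
    (pvCh parent parent.length b)).getD root_id

-- Pre_ excludes exactly the inputs on which A does not return: parent chains from a or b
-- that never leave the key set (A's while loop never terminates), and sizes missing the
-- one key A finally looks up (KeyError).
def Pre_lca_size_py (a : Int) (b : Int) (root_id : Int) (parent : List (Int × Int)) (sizes : List (Int × Int)) : Prop :=
  pvEsc parent parent.length a = true ∧
  pvEsc parent parent.length b = true ∧
  (pvPget sizes (pvLcaNode a b root_id parent)).isSome = true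

instance (a : Int) (b : Int) (root_id : Int) (parent : List (Int × Int)) (sizes : List (Int × Int)) : Decidable (Pre_lca_size_py a b root_id parent sizes) := by unfold Pre_lca_size_py; infer_instance

def pvWitness_lca_size_py : Int × Int × Int × (List (Int × Int)) × (List (Int × Int)) :=
  (1, 2, 0, [(1, 0), (2, 0)], [(0, 3), (1, 1), (2, 1)])

def Spec_lca_size_py (a : Int) (b : Int) (root_id : Int) (parent : List (Int × Int)) (sizes : List (Int × Int)) (out : Int) : Prop := out = lca_size_py_alt a b root_id parent sizes
instance (a : Int) (b : Int) (root_id : Int) (parent : List (Int × Int)) (sizes : List (Int × Int)) (out : Int) : Decidable (Spec_lca_size_py a b root_id parent sizes out) := by unfold Spec_lca_size_py; infer_instance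

-- ===== CLAIM (what is proved, stated in full; the proofs are below) =====
def Claim_equal_lca_size_py : Prop := ∀ (a : Int) (b : Int) (root_id : Int) (parent : List (Int × Int)) (sizes : List (Int × Int)), Dom_lca_size_py a b root_id parent sizes → Pre_lca_size_py a b root_id parent sizes → Spec_lca_size_py a b root_id parent sizes (lca_size_py a b root_id parent sizes)

-- ===== LEMMAS AND PROOFS =====

-- unfolding equations (cited with the value of pvPget known)
lemma pvChT_some {p : List (Int × Int)} {x v : Int} {f : Nat} (hx : pvPget p x = some v) :
    pvChT p (f + 1) x = v :: pvChT p f v := by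
  show (match pvPget p x with | some v => v :: pvChT p f v | none => []) = _
  rw [hx]

lemma pvChT_none {p : List (Int × Int)} {x : Int} {f : Nat} (hx : pvPget p x = none) :
    pvChT p (f + 1) x = [] := by
  show (match pvPget p x with | some v => v :: pvChT p f v | none => []) = _
  rw [hx]

lemma pvEsc_some {p : List (Int × Int)} {x v : Int} {f : Nat} (hx : pvPget p x = some v) :
    pvEsc p (f + 1) x = pvEsc p f v := by
  show (match pvPget p x with | some v => pvEsc p f v | none => true) = _
  rw [hx]

lemma pvEsc_none {p : List (Int × Int)} {x : Int} {f : Nat} (hx : pvPget p x = none) :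
    pvEsc p (f + 1) x = true := by
  show (match pvPget p x with | some v => pvEsc p f v | none => true) = _
  rw [hx]

lemma pvEsc_mono {p : List (Int × Int)} : ∀ {f : Nat} {x : Int},
    pvEsc p f x = true → pvEsc p (f + 1) x = true := by
  intro f
  induction f with
  | zero =>
    intro x h
    simp only [pvEsc, Option.isNone_iff_eq_none] at h
    exact pvEsc_none h
  | succ f ih =>
    intro x h
    cases hx : pvPget p x with
    | none => exact pvEsc_none hx
    | some v =>
      rw [pvEsc_some hx] at h
      rw [pvEsc_some hx]
      exact ih h

lemma pvChT_stable {p : List (Int × Int)} : ∀ {f : Nat} {x : Int},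
    pvEsc p f x = true → pvChT p (f + 1) x = pvChT p f x := by
  intro f
  induction f with
  | zero =>
    intro x h
    simp only [pvEsc, Option.isNone_iff_eq_none] at h
    rw [pvChT_none h]; rfl
  | succ f ih =>
    intro x h
    cases hx : pvPget p x with
    | none => rw [pvChT_none hx, pvChT_none hx]
    | some v =>
      rw [pvEsc_some hx] at h
      rw [pvChT_some (f := f + 1) hx, pvChT_some (f := f) hx, ih h]

lemma pvEsc_mem {p : List (Int × Int)} : ∀ {f : Nat} {x z : Int},
    pvEsc p f x = true → z ∈ pvCh p f x → pvEsc p f z = true := by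
  intro f
  induction f with
  | zero =>
    intro x z h hz
    simp [pvCh, pvChT] at hz; subst hz; exact h
  | succ f ih =>
    intro x z h hz
    cases hx : pvPget p x with
    | none =>
      rw [pvCh, pvChT_none hx] at hz
      simp at hz; subst hz
      exact pvEsc_none hx
    | some v =>
      rw [pvEsc_some hx] at h
      rw [pvCh, pvChT_some hx, ← pvCh, List.mem_cons] at hz
      rcases hz with hz | hz
      · subst hz; rw [pvEsc_some hx]; exact h
      · exact pvEsc_mono (ih h hz)

lemma pvCh_suffix {p : List (Int × Int)} : ∀ {f : Nat} {x z : Int},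
    pvEsc p f x = true → z ∈ pvCh p f x → pvCh p f z <:+ pvCh p f x := by
  intro f
  induction f with
  | zero =>
    intro x z _ hz
    simp [pvCh, pvChT] at hz; subst hz; exact List.suffix_refl _
  | succ f ih =>
    intro x z h hz
    cases hx : pvPget p x with
    | none =>
      rw [pvCh, pvChT_none hx] at hz
      simp at hz; subst hz
      exact List.suffix_refl _
    | some v =>
      rw [pvEsc_some hx] at h
      rw [pvCh, pvChT_some hx, ← pvCh, List.mem_cons] at hz
      have hxch : pvCh p (f + 1) x = x :: pvCh p f v := by
        rw [pvCh, pvChT_some hx, pvCh]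
      rcases hz with hz | hz
      · subst hz; exact List.suffix_refl _
      · have hesc : pvEsc p f z = true := pvEsc_mem h hz
        have hsuf := ih h hz
        rw [hxch, pvCh, pvChT_stable hesc, ← pvCh]
        exact hsuf.trans (List.suffix_cons _ _)

lemma pvCh_nodup {p : List (Int × Int)} : ∀ {f : Nat} {x : Int},
    pvEsc p f x = true → (pvCh p f x).Nodup := by
  intro f
  induction f with
  | zero => intro x _; simp [pvCh, pvChT]
  | succ f ih =>
    intro x h
    cases hx : pvPget p x with
    | none => rw [pvCh, pvChT_none hx]; simp
    | some v =>
      rw [pvEsc_some hx] at h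
      have hnd : (pvCh p f v).Nodup := ih h
      have hxmem : x ∉ pvCh p f v := by
        intro hmem
        have hescx : pvEsc p f x = true := pvEsc_mem h hmem
        have hsuf : pvCh p f x <:+ pvCh p f v := pvCh_suffix h hmem
        cases f with
        | zero =>
          simp [pvCh, pvChT] at hmem
          subst hmem
          simp only [pvEsc, hx, Option.isNone_some] at hescx
          cases hescx
        | succ f' =>
          have h'' : pvEsc p f' v = true := by rw [pvEsc_some hx] at hescx; exact hescx
          have hchx : pvCh p (f' + 1) x = x :: pvCh p f' v := by
            rw [pvCh, pvChT_some hx, pvCh]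
          have hchv : pvCh p (f' + 1) v = v :: pvChT p f' v := by
            rw [pvCh, pvChT_stable h'']
          have hlen := hsuf.length_le
          rw [hchx, hchv] at hlen
          simp [pvCh] at hlen
      rw [pvCh, pvChT_some hx, ← pvCh]
      exact List.nodup_cons.mpr ⟨hxmem, hnd⟩

-- ---- port A characterizations ----
lemma pvAClimb_mem {p : List (Int × Int)} : ∀ {f : Nat} {x m : Int} {anc : PySem.Set Int},
    (m ∈ pvAClimb p f anc x) ↔ m ∈ anc ∨ m ∈ pvChT p f x := by
  intro f
  induction f with
  | zero => intro x m anc; simp [pvAClimb, pvChT]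
  | succ f ih =>
    intro x m anc
    cases hx : pvPget p x with
    | none =>
      have : pvAClimb p (f + 1) anc x = anc := by
        show (match pvPget p x with
          | some v => pvAClimb p f (PySem.Set.add anc v) v | none => anc) = _
        rw [hx]
      rw [this, pvChT_none hx]
      simp
    | some v =>
      have : pvAClimb p (f + 1) anc x = pvAClimb p f (PySem.Set.add anc v) v := by
        show (match pvPget p x with
          | some v => pvAClimb p f (PySem.Set.add anc v) v | none => anc) = _
        rw [hx]
      rw [this, ih, PySem.Set.mem_add, pvChT_some hx, List.mem_cons]
      tauto

lemma pvBWalk_some {p : List (Int × Int)} {anc : PySem.Set Int} {y v : Int} {f : Nat}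
    (hc : PySem.Set.contains anc y = false) (hy : pvPget p y = some v) :
    pvBWalk p anc (f + 1) y = pvBWalk p anc f v := by
  show (if PySem.Set.contains anc y then y
    else match pvPget p y with | some v => pvBWalk p anc f v | none => y) = _
  rw [hc, hy]
  simp

lemma pvBWalk_char {p : List (Int × Int)} {anc : PySem.Set Int} {r : Int} :
    ∀ {f : Nat} {y : Int}, pvEsc p f y = true →
      (if PySem.Set.contains anc (pvBWalk p anc f y) then pvBWalk p anc f y else r)
        = (List.find? (fun z => PySem.Set.contains anc z) (pvCh p f y)).getD r := by
  intro f
  induction f with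
  | zero =>
    intro y _
    simp only [pvBWalk, pvCh, pvChT, List.find?]
    cases hc : PySem.Set.contains anc y <;> simp [hc]
  | succ f ih =>
    intro y h
    cases hc : PySem.Set.contains anc y with
    | true =>
      have hw : pvBWalk p anc (f + 1) y = y := by
        show (if PySem.Set.contains anc y then y
          else match pvPget p y with | some v => pvBWalk p anc f v | none => y) = _
        rw [hc]; simp
      rw [hw, pvCh, List.find?_cons_of_pos (by exact hc), hc]
      simp
    | false =>
      have hcn : ¬ (PySem.Set.contains anc y = true) := by rw [hc]; simp
      cases hy : pvPget p y with
      | none =>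
        have hw : pvBWalk p anc (f + 1) y = y := by
          show (if PySem.Set.contains anc y then y
            else match pvPget p y with | some v => pvBWalk p anc f v | none => y) = _
          rw [hc, hy]; simp
        rw [hw, pvCh, pvChT_none hy, List.find?_cons_of_neg hcn, hc]
        simp [List.find?]
      | some v =>
        rw [pvEsc_some hy] at h
        rw [pvBWalk_some hc hy, pvCh, pvChT_some hy,
          List.find?_cons_of_neg hcn, ← pvCh]
        exact ih h

-- ---- port B characterizations ----
lemma pvBChain_eq {p : List (Int × Int)} : ∀ {f : Nat} {n : Int} {c : List Int},
    pvBChain p f n c = c ++ pvChT p f n := by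
  intro f
  induction f with
  | zero => intro n c; simp [pvBChain, pvChT]
  | succ f ih =>
    intro n c
    cases hn : pvPget p n with
    | none =>
      have : pvBChain p (f + 1) n c = c := by
        show (match pvPget p n with
          | some v => pvBChain p f v (c ++ [v]) | none => c) = _
        rw [hn]
      rw [this, pvChT_none hn]
      simp
    | some v =>
      have : pvBChain p (f + 1) n c = pvBChain p f v (c ++ [v]) := by
        show (match pvPget p n with
          | some v => pvBChain p f v (c ++ [v]) | none => c) = _
        rw [hn]
      rw [this, ih, pvChT_some hn]
      simp

lemma pvScan_selfpairs : ∀ (l : List Int) (r : Int) (rest : List (Int × Int)),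
    pvScan r (l.map (fun x => (x, x)) ++ rest) = pvScan (l.getLastD r) rest := by
  intro l
  induction l with
  | nil => intro r rest; simp
  | cons x l ih =>
    intro r rest
    simp only [List.map_cons, List.cons_append, pvScan, ne_eq, not_true_eq_false, if_false,
      List.getLastD_cons]
    simpa using ih x rest

lemma pvZip_self : ∀ (l : List Int), List.zip l l = l.map (fun x => (x, x)) := by
  intro l
  induction l with
  | nil => rfl
  | cons x l ih => simp [List.zip_cons_cons, ih]

lemma pvFind_split {q : Int → Bool} : ∀ {l : List Int} {z : Int}, List.find? q l = some z →
    ∃ l1 l2, l = l1 ++ z :: l2 ∧ (∀ x ∈ l1, q x = false) ∧ q z = true := by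
  intro l
  induction l with
  | nil => intro z h; simp [List.find?] at h
  | cons x t ih =>
    intro z h
    by_cases hx : q x = true
    · rw [List.find?_cons_of_pos hx] at h
      injection h with h; subst h
      exact ⟨[], t, by simp, by simp, hx⟩
    · rw [List.find?_cons_of_neg hx] at h
      obtain ⟨l1, l2, h1, h2, h3⟩ := ih h
      exact ⟨x :: l1, l2, by simp [h1], by
        intro y hy
        rcases List.mem_cons.mp hy with rfl | hy
        · simpa using hx
        · exact h2 y hy, h3⟩

lemma pvSplit_unique : ∀ (t1 : List Int) {r1 : List Int} {t2 r2 : List Int} {z : Int},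
    t1 ++ z :: r1 = t2 ++ z :: r2 → z ∉ t1 → z ∉ t2 → t1 = t2 := by
  intro t1
  induction t1 with
  | nil =>
    intro r1 t2 r2 z h _ hz2
    cases t2 with
    | nil => rfl
    | cons y t2 =>
      simp only [List.nil_append, List.cons_append, List.cons.injEq] at h
      exact absurd (h.1 ▸ List.mem_cons_self) hz2
  | cons x t1 ih =>
    intro r1 t2 r2 z h hz1 hz2
    cases t2 with
    | nil =>
      simp only [List.cons_append, List.nil_append, List.cons.injEq] at h
      exact absurd (h.1 ▸ List.mem_cons_self) hz1
    | cons y t2 =>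
      simp only [List.cons_append, List.cons.injEq] at h
      obtain ⟨rfl, h⟩ := h
      rw [ih h (fun hm => hz1 (List.mem_cons_of_mem _ hm))
        (fun hm => hz2 (List.mem_cons_of_mem _ hm))]

-- main list-level lemma: first element of cb lying in ca (else r) = lockstep scan of the
-- reversed chains, given that common elements induce a common suffix and cb has no duplicates
lemma pvMain (r : Int) (ca cb : List Int) (hnb : cb.Nodup)
    (hs : ∀ z, z ∈ ca → z ∈ cb → ∃ s : List Int, s.head? = some z ∧ s <:+ ca ∧ s <:+ cb) :
    (List.find? (fun z => decide (z ∈ ca)) cb).getD r = pvScan r (List.zip ca.reverse cb.reverse) := by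
  cases hfind : List.find? (fun z => decide (z ∈ ca)) cb with
  | none =>
    have hnone := List.find?_eq_none.mp hfind
    cases hca : ca.reverse with
    | nil => simp [List.zip_nil_left, pvScan]
    | cons u ta' =>
      cases hcb : cb.reverse with
      | nil => simp [List.zip_nil_right, pvScan]
      | cons v tb' =>
        have hu : u ∈ ca := by
          have : u ∈ ca.reverse := hca ▸ List.mem_cons_self
          simpa using this
        have hv : v ∈ cb := by
          have : v ∈ cb.reverse := hcb ▸ List.mem_cons_self
          simpa using this
        have huv : u ≠ v := by
          intro h
          exact absurd (by simpa using (h ▸ hu)) (by simpa using hnone v hv)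
        simp [List.zip_cons_cons, pvScan, huv]
  | some z0 =>
    obtain ⟨l1, l2, hsplit, hl1, hz0⟩ := pvFind_split hfind
    have hz0ca : z0 ∈ ca := by simpa using hz0
    have hz0cb : z0 ∈ cb := hsplit ▸ List.mem_append_right _ List.mem_cons_self
    obtain ⟨s, hhead, hsca, hscb⟩ := hs z0 hz0ca hz0cb
    obtain ⟨s2, rfl⟩ : ∃ s2, s = z0 :: s2 := by
      cases s with
      | nil => simp at hhead
      | cons w s2 => simp at hhead; exact ⟨s2, by rw [hhead]⟩
    obtain ⟨ta, hta⟩ := hsca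
    obtain ⟨tb, htb⟩ := hscb
    -- z0 occurs only once in cb, so tb = l1
    have hz0tb : z0 ∉ tb := by
      have hd := List.disjoint_of_nodup_append (htb ▸ hnb)
      exact fun hm => hd hm List.mem_cons_self
    have hz0l1 : z0 ∉ l1 := by
      intro hm
      have := hl1 z0 hm
      simp [hz0ca] at this
    have htbl1 : tb = l1 := pvSplit_unique tb (by rw [htb, hsplit]) hz0tb hz0l1
    -- compute the scan
    rw [← hta, ← htb]
    rw [List.reverse_append, List.reverse_append,
      List.zip_append (by simp), pvZip_self, pvScan_selfpairs]
    have hlast : (z0 :: s2).reverse.getLastD r = z0 := by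
      rw [List.getLastD_eq_getLast?, List.getLast?_reverse]
      simp
    rw [hlast]
    simp only [Option.getD_some]
    cases hta' : ta.reverse with
    | nil => simp [List.zip_nil_left, pvScan]
    | cons u ua =>
      cases htb' : tb.reverse with
      | nil => simp [List.zip_nil_right, pvScan]
      | cons v va =>
        have hu : u ∈ ca := by
          have : u ∈ ta.reverse := hta' ▸ List.mem_cons_self
          rw [← hta]
          exact List.mem_append_left _ (by simpa using this)
        have hv : v ∈ l1 := by
          have : v ∈ tb.reverse := htb' ▸ List.mem_cons_self
          rw [← htbl1]
          simpa using this
        have hvca : v ∉ ca := by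
          intro hm
          have := hl1 v hv
          simp [hm] at this
        have huv : u ≠ v := fun h => hvca (h ▸ hu)
        simp [List.zip_cons_cons, pvScan, huv]

-- ===== VERDICT (by name: the statement is the Claim_ definition above) =====
theorem lca_size_py_spec : Claim_equal_lca_size_py := by
  intro a b root_id parent sizes _ hpre
  obtain ⟨hesca, hescb, _⟩ := hpre
  unfold Spec_lca_size_py lca_size_py lca_size_py_alt
  set F := parent.length with hF
  -- the ancestor set of A is the chain of a
  set anc := pvAClimb parent F (PySem.Set.add PySem.Set.empty a) a with hanc
  have hancmem : ∀ m : Int, (m ∈ anc) ↔ m ∈ pvCh parent F a := by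
    intro m
    rw [hanc, pvAClimb_mem, PySem.Set.mem_add]
    simp [PySem.Set.empty, pvCh]
  have hcont : (fun z => PySem.Set.contains anc z) = (fun z => decide (z ∈ pvCh parent F a)) := by
    funext z
    by_cases hm : z ∈ pvCh parent F a
    · rw [(PySem.Set.contains_iff anc z).mpr ((hancmem z).mpr hm)]
      simp [hm]
    · have hna : z ∉ anc := fun hin => hm ((hancmem z).mp hin)
      have hcf : PySem.Set.contains anc z = false := by
        cases hcc : PySem.Set.contains anc z
        · rfl
        · exact absurd ((PySem.Set.contains_iff anc z).mp hcc) hna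
      rw [hcf]
      simp [hm]
  -- A's key
  have hA : (if PySem.Set.contains anc (pvBWalk parent anc F b) then pvBWalk parent anc F b
      else root_id)
      = (List.find? (fun z => decide (z ∈ pvCh parent F a)) (pvCh parent F b)).getD root_id := by
    rw [pvBWalk_char hescb, hcont]
  -- B's chains
  have hca : pvBChain parent F a [a] = pvCh parent F a := by rw [pvBChain_eq]; rfl
  have hcb : pvBChain parent F b [b] = pvCh parent F b := by rw [pvBChain_eq]; rfl
  simp only [hA, hca, hcb]
  congr 2
  exact pvMain root_id (pvCh parent F a) (pvCh parent F b) (pvCh_nodup hescb)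
    (fun z hza hzb => ⟨pvCh parent F z, rfl, pvCh_suffix hesca hza, pvCh_suffix hescb hzb⟩)
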